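-- pv_equiv track=rewrite | github.com/thedarknessqueen/Portfolio | Portfolio/Python/Théorie des ondes/Modulation.py | encode_manchester
-- ===== SOURCE A (Python) =====
-- def encode_manchester(binary):
--     manchester = ''
--     for bit in binary:
--         if bit == '1':
--             manchester += '01'
--         elif bit == '0':
--             manchester += '10'
--         else:
--             return 'Erreur: le nombre binaire contient des caractères invalides.'
--     return manchester
-- ===== SOURCE B (Python) =====
-- def encode_manchester(binary):
--     if binary.strip('01'):
--         return 'Erreur: le nombre binaire contient des caract\u00e8res invalides.'
--     # output position i (0 <= i < 2n) holds '01'[(i & 1) ^ (binary[i >> 1] == '0')]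
--     return ''.join('01'[(i & 1) ^ (binary[i >> 1] == '0')] for i in range(2 * len(binary)))
-- ===== Notes on version B (the rewrite author's own statement) =====
-- stated objective: alternative
-- what changed: Instead of scanning the input and appending a two-char code per bit with an early error return, B validates once by stripping the two bit characters and then iterates over the 2n OUTPUT positions, computing each output character via a closed-form parity/XOR formula on the position index and binary[i>>1].
import Mathlib
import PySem

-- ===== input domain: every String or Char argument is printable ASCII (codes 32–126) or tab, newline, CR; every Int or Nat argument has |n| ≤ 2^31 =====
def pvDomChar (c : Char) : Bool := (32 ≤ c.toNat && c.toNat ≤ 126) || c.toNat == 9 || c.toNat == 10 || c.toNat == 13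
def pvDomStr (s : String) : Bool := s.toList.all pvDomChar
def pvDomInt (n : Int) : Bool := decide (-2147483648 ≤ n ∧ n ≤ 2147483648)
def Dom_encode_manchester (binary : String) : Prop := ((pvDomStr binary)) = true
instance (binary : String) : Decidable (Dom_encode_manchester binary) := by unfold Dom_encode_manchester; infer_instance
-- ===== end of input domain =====

-- B validates once by stripping the bit characters, then fills the 2n output positions by a parity/XOR index formula; alternative algorithm, same values.


-- ===== PORT A =====
-- A's loop with early return: recursion over the chars carrying the accumulator string.
def encAuxA : List Char → String → String
  | [], acc => acc
  | c :: rest, acc =>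
      if c = '1' then encAuxA rest (acc ++ "01")
      else if c = '0' then encAuxA rest (acc ++ "10")
      else "Erreur: le nombre binaire contient des caractères invalides."

def encode_manchester (binary : String) : String :=
  encAuxA binary.toList ""

-- ===== PORT B =====
-- binary.strip('01') truthiness → stripChars ≠ ""; then map over range(2n);
-- '01'[(i & 1) ^ (binary[i >> 1] == '0')] → the if over the XOR (≠) of the two tests;
-- binary[i >> 1] is always in range here, ported as getD.
def encode_manchester_alt (binary : String) : String :=
  if PySem.Str.stripChars binary "01" ≠ "" then
    "Erreur: le nombre binaire contient des caractères invalides."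
  else
    String.ofList ((List.range (2 * binary.toList.length)).map (fun i =>
      if (i % 2 = 1) ≠ (binary.toList.getD (i / 2) ' ' = '0') then '1' else '0'))

-- ===== PRECONDITION & SPEC =====
def Spec_encode_manchester (binary : String) (out : String) : Prop := out = encode_manchester_alt binary
instance (binary : String) (out : String) : Decidable (Spec_encode_manchester binary out) := by unfold Spec_encode_manchester; infer_instance

-- ===== CLAIM (what is proved, stated in full; the proofs are below) =====
def Claim_equal_encode_manchester : Prop := ∀ (binary : String), Dom_encode_manchester binary → Spec_encode_manchester binary (encode_manchester binary)

-- ===== LEMMAS AND PROOFS =====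
theorem ofList_cons_cons (a b : Char) (l : List Char) :
    String.ofList (a :: b :: l) = String.ofList [a, b] ++ String.ofList l := by
  rw [show a :: b :: l = [a, b] ++ l from rfl, String.ofList_append]

-- A's loop computes the flatMap form, guarded by whole-string validity.
theorem encAuxA_eq (l : List Char) : ∀ acc : String,
    encAuxA l acc =
      if l.all (fun c => c == '0' || c == '1') then
        acc ++ String.ofList (l.flatMap (fun c => if c = '0' then ['1', '0'] else ['0', '1']))
      else "Erreur: le nombre binaire contient des caractères invalides." := by
  induction l with
  | nil =>
      intro acc
      simp [encAuxA]
  | cons c rest ih =>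
      intro acc
      by_cases h1 : c = '1'
      · subst h1
        rw [show encAuxA ('1' :: rest) acc = encAuxA rest (acc ++ "01") from rfl, ih]
        by_cases hr : rest.all (fun c => c == '0' || c == '1') = true
        · rw [if_pos hr, if_pos (by simp [hr])]
          simp [String.append_assoc]
          rw [ofList_cons_cons]
        · rw [if_neg hr, if_neg (by simp [hr])]
      · by_cases h0 : c = '0'
        · subst h0
          rw [show encAuxA ('0' :: rest) acc = encAuxA rest (acc ++ "10") from rfl, ih]
          by_cases hr : rest.all (fun c => c == '0' || c == '1') = true
          · rw [if_pos hr, if_pos (by simp [hr])]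
            simp [String.append_assoc]
            rw [ofList_cons_cons]
          · rw [if_neg hr, if_neg (by simp [hr])]
        · rw [show encAuxA (c :: rest) acc
              = "Erreur: le nombre binaire contient des caractères invalides." from by
            simp [encAuxA, h1, h0]]
          rw [if_neg (by simp [h0, h1])]

-- strip('01') leaves nothing ↔ every char is '0' or '1'.
theorem stripChars_eq_nil_iff (l : List Char) :
    PySem.Chars.stripChars l ['0', '1'] = [] ↔ (l.all (fun c => c == '0' || c == '1')) = true := by
  have hp : ∀ c : Char, (['0', '1'].contains c) = (c == '0' || c == '1') := by
    intro c; by_cases h0 : c = '0' <;> by_cases h1 : c = '1' <;> simp [h0, h1]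
  have hpf : (fun c : Char => (['0', '1'].contains c)) = (fun c => c == '0' || c == '1') :=
    funext hp
  unfold PySem.Chars.stripChars
  constructor
  · intro h
    have h1 : List.dropWhile (fun c => ['0', '1'].contains c)
        ((List.dropWhile (fun c => ['0', '1'].contains c) l).reverse) = [] :=
      List.reverse_eq_nil_iff.mp h
    have hall := List.dropWhile_eq_nil_iff.mp h1
    have hnil : List.dropWhile (fun c => ['0', '1'].contains c) l = [] := by
      rcases hd : List.dropWhile (fun c => ['0', '1'].contains c) l with _ | ⟨a, t⟩
      · rfl
      · exfalso
        have hmem : a ∈ (List.dropWhile (fun c => ['0', '1'].contains c) l).reverse := by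
          rw [hd]; simp
        have htrue := hall a hmem
        have hfalse : ((fun c => ['0', '1'].contains c) a) = false := by
          have := List.head?_dropWhile_not (p := fun c => ['0', '1'].contains c) (l := l)
          rw [hd] at this
          simpa using this
        simp_all
    rw [List.all_eq_true]
    intro x hx
    rw [← hp]
    exact List.dropWhile_eq_nil_iff.mp hnil x hx
  · intro h
    have hnil : List.dropWhile (fun c => ['0', '1'].contains c) l = [] := by
      rw [List.dropWhile_eq_nil_iff]
      intro x hx
      rw [hp]
      exact List.all_eq_true.mp h x hx
    show (List.dropWhile (fun c => ['0', '1'].contains c)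
        (List.dropWhile (fun c => ['0', '1'].contains c) l).reverse).reverse = []
    rw [hnil]
    simp

-- the index-formula pass over range(2n) equals the flatMap form, for ANY char list.
theorem range_map_eq_flatMap (l : List Char) :
    (List.range (2 * l.length)).map (fun i =>
        if (i % 2 = 1) ≠ (l.getD (i / 2) ' ' = '0') then '1' else '0')
      = l.flatMap (fun c => if c = '0' then ['1', '0'] else ['0', '1']) := by
  induction l using List.reverseRecOn with
  | nil => simp
  | append_singleton l c ih =>
      have hlen : 2 * (l ++ [c]).length = 2 * l.length + 1 + 1 := by simp; omega
      rw [hlen, List.range_succ, List.range_succ, List.map_append, List.map_append]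
      have hagree : ∀ i ∈ List.range (2 * l.length),
          (fun i => if (i % 2 = 1) ≠ ((l ++ [c]).getD (i / 2) ' ' = '0') then '1' else '0') i
            = (fun i => if (i % 2 = 1) ≠ (l.getD (i / 2) ' ' = '0') then '1' else '0') i := by
        intro i hi
        have hi' : i < 2 * l.length := List.mem_range.mp hi
        have hlt : i / 2 < l.length := by omega
        simp only [List.getD, List.getElem?_append_left hlt]
        rfl
      rw [List.map_congr_left hagree, ih, List.flatMap_append]
      have hc0 : (l ++ [c]).getD ((2 * l.length) / 2) ' ' = c := by
        have : (2 * l.length) / 2 = l.length := by omega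
        simp [this, List.getD]
      have hc1 : (l ++ [c]).getD ((2 * l.length + 1) / 2) ' ' = c := by
        have : (2 * l.length + 1) / 2 = l.length := by omega
        simp [this, List.getD]
      have he : (2 * l.length) % 2 = 0 := by omega
      have ho : (2 * l.length + 1) % 2 = 1 := by omega
      simp only [List.map_cons, List.map_nil, hc0, hc1, he, ho]
      by_cases h : c = '0' <;> simp [h, List.flatMap_cons]

-- ===== VERDICT (by name: the statement is the Claim_ definition above) =====
theorem encode_manchester_spec : Claim_equal_encode_manchester := by
  intro binary _
  unfold Spec_encode_manchester encode_manchester encode_manchester_alt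
  rw [encAuxA_eq]
  have hstrip : (PySem.Str.stripChars binary "01" ≠ "") ↔
      ¬ (binary.toList.all (fun c => c == '0' || c == '1')) = true := by
    rw [not_iff_not, ← stripChars_eq_nil_iff]
    constructor
    · intro h
      have := congrArg String.toList h
      rwa [PySem.Str.toList_stripChars] at this
    · intro h
      have : (PySem.Str.stripChars binary "01").toList = "".toList := by
        rw [PySem.Str.toList_stripChars]; simpa using h
      exact String.toList_inj.mp this
  by_cases hv : (binary.toList.all (fun c => c == '0' || c == '1')) = true
  · rw [if_pos hv, if_neg (by rw [hstrip]; simp [hv])]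
    rw [range_map_eq_flatMap]
    simp
  · rw [if_neg hv, if_pos (hstrip.mpr hv)]
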